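-- pv_equiv track=rewrite | github.com/gbova/stats | models.py | create_values_greater_dict
-- ===== SOURCE A (Python) =====
-- def create_values_greater_dict(frequency_map, min_element, max_element):
--     values_greater = {}
--     num_elements_greater_than_current_num = frequency_map[max_element]
--     for current_num in range(max_element - 1, min_element - 1, -1):
--         values_greater[current_num] = num_elements_greater_than_current_num
--         if current_num in frequency_map:
--             num_elements_greater_than_current_num += frequency_map[current_num]
--     return values_greater
-- ===== SOURCE B (Python) =====
-- def create_values_greater_dict(frequency_map, min_element, max_element):
--     total = frequency_map[max_element] + sum(
--         frequency_map.get(k, 0) for k in range(min_element + 1, max_element))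
--     items = []
--     prefix = 0
--     for current_num in range(min_element, max_element):
--         items.append((current_num, total - prefix))
--         prefix += frequency_map.get(current_num + 1, 0)
--     return dict(reversed(items))
-- ===== Notes on version B (the rewrite author's own statement) =====
-- stated objective: alternative
-- what changed: Replaces the single descending suffix-accumulation loop with a two-pass prefix-complement scheme: first compute the grand total of frequencies in the range, then sweep ascending maintaining a prefix sum and emit total-minus-prefix, finally reverse the items to restore the descending insertion order.
import Mathlib
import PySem

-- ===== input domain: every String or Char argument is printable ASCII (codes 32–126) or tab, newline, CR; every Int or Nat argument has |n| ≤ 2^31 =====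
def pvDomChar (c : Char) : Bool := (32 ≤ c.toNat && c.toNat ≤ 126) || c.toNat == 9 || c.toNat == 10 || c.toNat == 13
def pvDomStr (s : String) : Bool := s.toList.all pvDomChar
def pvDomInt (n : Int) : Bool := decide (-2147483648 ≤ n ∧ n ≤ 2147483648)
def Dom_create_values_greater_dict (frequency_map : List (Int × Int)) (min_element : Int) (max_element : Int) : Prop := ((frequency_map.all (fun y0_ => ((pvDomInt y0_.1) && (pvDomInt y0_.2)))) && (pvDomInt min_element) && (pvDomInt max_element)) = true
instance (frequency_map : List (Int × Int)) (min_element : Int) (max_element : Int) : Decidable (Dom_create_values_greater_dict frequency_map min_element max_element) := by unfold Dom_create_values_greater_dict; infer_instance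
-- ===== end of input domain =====

-- B replaces A's single descending suffix-accumulation loop by a two-pass prefix-complement
-- scheme (grand total, then an ascending prefix-sum sweep emitting total − prefix, then a
-- reversal restoring the descending insertion order); alternative decomposition, same cost.

-- ===== PORT A =====
-- loop body of A: insert values_greater[current_num] = count, then bump the running suffix count
def pvStepA (fm : PySem.Dict Int Int) (st : PySem.Dict Int Int × Int) (current_num : Int) :
    PySem.Dict Int Int × Int :=
  let vg := st.1.insert current_num st.2
  if fm.contains current_num then
    (vg, st.2 + (fm.get? current_num).getD 0)
  else
    (vg, st.2)

-- frequency_map[max_element] raises KeyError outside Pre_; the port uses getD 0 there (value unclaimed)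
def create_values_greater_dict (frequency_map : List (Int × Int)) (min_element : Int) (max_element : Int) : List (Int × Int) :=
  ((PySem.List.pyRange (max_element - 1) (min_element - 1) (-1)).foldl
    (pvStepA (PySem.Dict.mk frequency_map))
    (PySem.Dict.empty, (((PySem.Dict.mk frequency_map).get? max_element).getD 0))).1.items

-- ===== PORT B =====
-- total = frequency_map[max_element] + sum(frequency_map.get(k, 0) for k in range(min+1, max))
def pvTotal (fm : PySem.Dict Int Int) (min_element max_element : Int) : Int :=
  (fm.get? max_element).getD 0 +
    (PySem.List.pyRange (min_element + 1) max_element 1).foldl (fun s k => s + fm.getD k 0) 0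

-- loop body of B: append (current_num, total - prefix), then bump the prefix sum
def pvStepB (fm : PySem.Dict Int Int) (total : Int) (st : List (Int × Int) × Int)
    (current_num : Int) : List (Int × Int) × Int :=
  (st.1 ++ [(current_num, total - st.2)], st.2 + fm.getD (current_num + 1) 0)

-- the ascending items list
def pvItems (fm : PySem.Dict Int Int) (total min_element max_element : Int) : List (Int × Int) :=
  ((PySem.List.pyRange min_element max_element 1).foldl (pvStepB fm total) ([], 0)).1

-- dict(reversed(items))
def create_values_greater_dict_alt (frequency_map : List (Int × Int)) (min_element : Int) (max_element : Int) : List (Int × Int) :=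
  ((pvItems (PySem.Dict.mk frequency_map)
      (pvTotal (PySem.Dict.mk frequency_map) min_element max_element)
      min_element max_element).reverse.foldl
    (fun (d : PySem.Dict Int Int) kv => d.insert kv.1 kv.2) PySem.Dict.empty).items

-- ===== PRECONDITION & SPEC =====
-- Pre_ excludes exactly the inputs where Python A raises KeyError (max_element absent); B raises there too.
def Pre_create_values_greater_dict (frequency_map : List (Int × Int)) (min_element : Int) (max_element : Int) : Prop :=
  (PySem.Dict.mk frequency_map).contains max_element = true
instance (frequency_map : List (Int × Int)) (min_element : Int) (max_element : Int) : Decidable (Pre_create_values_greater_dict frequency_map min_element max_element) := by unfold Pre_create_values_greater_dict; infer_instance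

def pvWitness_create_values_greater_dict : (List (Int × Int)) × Int × Int := ([(3, 2), (1, 1), (2, 4)], 1, 3)

def Spec_create_values_greater_dict (frequency_map : List (Int × Int)) (min_element : Int) (max_element : Int) (out : List (Int × Int)) : Prop := out = create_values_greater_dict_alt frequency_map min_element max_element
instance (frequency_map : List (Int × Int)) (min_element : Int) (max_element : Int) (out : List (Int × Int)) : Decidable (Spec_create_values_greater_dict frequency_map min_element max_element out) := by unfold Spec_create_values_greater_dict; infer_instance

-- ===== CLAIM (what is proved, stated in full; the proofs are below) =====
def Claim_equal_create_values_greater_dict : Prop := ∀ (frequency_map : List (Int × Int)) (min_element : Int) (max_element : Int), Dom_create_values_greater_dict frequency_map min_element max_element → Pre_create_values_greater_dict frequency_map min_element max_element → Spec_create_values_greater_dict frequency_map min_element max_element (create_values_greater_dict frequency_map min_element max_element)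

-- ===== LEMMAS AND PROOFS =====

-- g a + g (a+1) + … + g (a+m-1)
def pvS (g : Int → Int) (a : Int) : Nat → Int
  | 0 => 0
  | m + 1 => g a + pvS g (a + 1) m

def pvGetD0 (fm : PySem.Dict Int Int) (k : Int) : Int := fm.getD k 0

theorem pvS_succ_right (g : Int → Int) (m : Nat) : ∀ (a : Int),
    pvS g a (m + 1) = pvS g a m + g (a + m) := by
  induction m with
  | zero => intro a; simp [pvS]
  | succ m ih =>
    intro a
    rw [pvS, ih, pvS]
    push_cast
    ring_nf

theorem pvS_add (g : Int → Int) (m2 : Nat) : ∀ (a : Int) (m1 : Nat),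
    pvS g a (m1 + m2) = pvS g a m1 + pvS g (a + m1) m2 := by
  induction m2 with
  | zero => intro a m1; simp [pvS]
  | succ m ih =>
    intro a m1
    have h1 : m1 + (m + 1) = (m1 + m) + 1 := by omega
    rw [h1, pvS_succ_right, ih, pvS_succ_right]
    push_cast
    ring_nf

theorem pvStepA_eq (fm : PySem.Dict Int Int) (d : PySem.Dict Int Int) (acc c : Int) :
    pvStepA fm (d, acc) c = (d.insert c acc, acc + pvGetD0 fm c) := by
  unfold pvStepA pvGetD0
  by_cases h : fm.contains c = true
  · rw [if_pos h, PySem.Dict.getD_eq_get?_getD]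
  · rw [if_neg h, PySem.Dict.getD_of_not_contains _ _ (by simpa using h)]
    simp

-- A's loop: descending fold over fresh keys appends; the running count grows by getD.
theorem pvA_loop (fm : PySem.Dict Int Int) (b : Int) (n : Nat) :
    ∀ (c : Int) (acc : Int) (d : PySem.Dict Int Int),
      c - b = (n : Int) →
      (∀ k ∈ d.keys, c < k) →
      (((PySem.List.pyRange c b (-1)).foldl (pvStepA fm) (d, acc)).1.items
        = d.items ++ (PySem.List.pyRange c b (-1)).map
            (fun x => (x, acc + pvS (pvGetD0 fm) (x + 1) ((c - x).toNat)))) := by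
  induction n with
  | zero =>
    intro c acc d hn _
    rw [PySem.List.pyRange_neg_one_eq_nil (by omega)]
    simp
  | succ n ih =>
    intro c acc d hn hd
    rw [PySem.List.pyRange_neg_one_cons (by omega)]
    simp only [List.foldl_cons, List.map_cons, pvStepA_eq]
    have hcfresh : d.contains c = false := by
      rw [PySem.Dict.contains_eq_decide_mem_keys]
      simp only [decide_eq_false_iff_not]
      intro hmem
      exact absurd (hd c hmem) (lt_irrefl c)
    have hkeys : ∀ k ∈ (d.insert c acc).keys, c - 1 < k := by
      intro k hk
      rw [PySem.Dict.mem_keys_insert] at hk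
      rcases hk with h | h
      · omega
      · have := hd k h; omega
    rw [ih (c - 1) (acc + pvGetD0 fm c) (d.insert c acc) (by omega) hkeys,
        PySem.Dict.items_insert_of_not_contains _ _ hcfresh]
    simp only [List.append_assoc, List.cons_append, List.nil_append, List.append_cancel_left_eq]
    congr 1
    · have h0 : (c - c).toNat = 0 := by omega
      rw [h0]; simp [pvS]
    · apply List.map_congr_left
      intro x hx
      rw [PySem.List.mem_pyRange_neg_one] at hx
      have h1 : (c - x).toNat = (c - 1 - x).toNat + 1 := by omega
      rw [h1, pvS_succ_right]
      have h2 : x + 1 + ((c - 1 - x).toNat : Int) = c := by omega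
      rw [h2]
      ring_nf

-- B's total: the sum loop over the ascending range is pvS.
theorem pvB_sum (fm : PySem.Dict Int Int) (b : Int) (n : Nat) :
    ∀ (a : Int) (s0 : Int), b - a = (n : Int) →
      (PySem.List.pyRange a b 1).foldl (fun s k => s + fm.getD k 0) s0
        = s0 + pvS (pvGetD0 fm) a n := by
  induction n with
  | zero =>
    intro a s0 hn
    rw [PySem.List.pyRange_one_eq_nil (by omega)]
    simp [pvS]
  | succ n ih =>
    intro a s0 hn
    rw [PySem.List.pyRange_one_cons (by omega)]
    simp only [List.foldl_cons]
    rw [ih (a + 1) (s0 + fm.getD a 0) (by omega)]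
    simp [pvS, pvGetD0]
    ring

-- B's ascending items loop: it builds the map of (x, total − prefix-sum up to x).
theorem pvB_loop (fm : PySem.Dict Int Int) (total b : Int) (n : Nat) :
    ∀ (c : Int) (p : Int) (lst : List (Int × Int)),
      b - c = (n : Int) →
      (((PySem.List.pyRange c b 1).foldl (pvStepB fm total) (lst, p)).1
        = lst ++ (PySem.List.pyRange c b 1).map
            (fun x => (x, total - (p + pvS (pvGetD0 fm) (c + 1) ((x - c).toNat))))) := by
  induction n with
  | zero =>
    intro c p lst hn
    rw [PySem.List.pyRange_one_eq_nil (by omega)]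
    simp
  | succ n ih =>
    intro c p lst hn
    rw [PySem.List.pyRange_one_cons (by omega)]
    simp only [List.foldl_cons, List.map_cons, pvStepB]
    rw [ih (c + 1) (p + fm.getD (c + 1) 0) (lst ++ [(c, total - p)]) (by omega)]
    simp only [List.append_assoc, List.cons_append, List.nil_append, List.append_cancel_left_eq]
    congr 1
    · have h0 : (c - c).toNat = 0 := by omega
      rw [h0]; simp [pvS]
    · apply List.map_congr_left
      intro x hx
      rw [PySem.List.mem_pyRange_one] at hx
      have h1 : (x - c).toNat = (x - (c + 1)).toNat + 1 := by omega
      rw [h1]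
      simp only [pvS, pvGetD0]
      ring_nf

-- B's final dict(reversed(items)) build: fresh distinct keys append, so the list comes back unchanged
theorem pvB_final (l : List (Int × Int)) (hnd : (l.map Prod.fst).Nodup) :
    (l.foldl (fun (d : PySem.Dict Int Int) kv => d.insert kv.1 kv.2) PySem.Dict.empty).items = l := by
  have h := PySem.Dict.items_foldl_insert_fresh (l := l) (k := Prod.fst) (v := Prod.snd)
    (d := PySem.Dict.empty) (by intro a _; simp) hnd
  simpa using h

theorem pv_nodup_fst (R : List Int) (v : Int → Int) (h : R.Nodup) :
    ((R.map (fun x => (x, v x))).map Prod.fst).Nodup := by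
  simpa [List.map_map, Function.comp_def] using h

theorem create_values_greater_dict_eq (frequency_map : List (Int × Int)) (min_element max_element : Int) :
    create_values_greater_dict frequency_map min_element max_element
      = create_values_greater_dict_alt frequency_map min_element max_element := by
  unfold create_values_greater_dict create_values_greater_dict_alt pvTotal pvItems
  set fm : PySem.Dict Int Int := PySem.Dict.mk frequency_map with hfm
  set base : Int := (fm.get? max_element).getD 0 with hbase
  set g : Int → Int := pvGetD0 fm with hg
  by_cases hle : max_element ≤ min_element
  · -- empty range: both sides are []
    rw [PySem.List.pyRange_neg_one_eq_nil (by omega),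
        PySem.List.pyRange_one_eq_nil (a := min_element + 1) (b := max_element) (by omega),
        PySem.List.pyRange_one_eq_nil (a := min_element) (b := max_element) (by omega)]
    simp
  · have hlt : min_element < max_element := by omega
    rw [pvA_loop fm (min_element - 1) ((max_element - min_element).toNat)
          (max_element - 1) base PySem.Dict.empty (by omega)
          (by simp [PySem.Dict.keys_empty]),
        pvB_sum fm max_element ((max_element - (min_element + 1)).toNat)
          (min_element + 1) 0 (by omega),
        pvB_loop fm (base + (0 + pvS g (min_element + 1) ((max_element - (min_element + 1)).toNat)))
          max_element ((max_element - min_element).toNat) min_element 0 [] (by omega)]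
    rw [pvB_final _ (by
      simp only [List.nil_append, List.map_reverse, List.nodup_reverse]
      exact pv_nodup_fst _ _ (PySem.List.nodup_pyRange_one min_element max_element))]
    have hempty : (PySem.Dict.empty : PySem.Dict Int Int).items = ([] : List (Int × Int)) := rfl
    rw [hempty, List.nil_append, List.nil_append]
    have hrev : PySem.List.pyRange (max_element - 1) (min_element - 1) (-1)
        = (PySem.List.pyRange min_element max_element 1).reverse := by
      rw [PySem.List.pyRange_neg_one_eq_reverse]
      congr 1 ; ring_nf
    rw [hrev, ← List.map_reverse]
    apply List.map_congr_left
    intro x hx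
    rw [List.mem_reverse, PySem.List.mem_pyRange_one] at hx
    have hM : (max_element - (min_element + 1)).toNat
        = (x - min_element).toNat + (max_element - 1 - x).toNat := by omega
    rw [hM, pvS_add]
    have hx1 : min_element + 1 + ((x - min_element).toNat : Int) = x + 1 := by omega
    rw [hx1]
    simp only [Prod.mk.injEq, true_and]
    ring

-- ===== VERDICT (by name: the statement is the Claim_ definition above) =====
theorem create_values_greater_dict_spec : Claim_equal_create_values_greater_dict := by
  intro fm mn mx _ _
  exact create_values_greater_dict_eq fm mn mx
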